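-- pv_equiv track=rewrite | github.com/phuong27102000/NTRU_HRSS_KEM_SV | Draft_Phuong/ternary/poly.py | s2
-- ===== SOURCE A (Python) =====
-- def s2(m,n):
--     out = m.copy()
--     k = len(out)
--     while k>n:
--         out[k-1-n] += out.pop()
--         k-=1
--     while k<n-1:
--         out += [0]
--         k+=1
--     if k==n:
--         for i in range(0,n-1):
--             out[i] -= out[n-1]
--         out.pop()
--     for i in range(0,n-1):
--         out[i] &= 1
--     return out
-- ===== SOURCE B (Python) =====
-- def s2(m, n):
--     if len(m) >= n:
--         r = [0] * n
--         for i, v in enumerate(m):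
--             r[i % n] += v
--         last = r[n - 1]
--         return [(r[i] - last) & 1 for i in range(n - 1)]
--     else:
--         return [x & 1 for x in m + [0] * (n - 1 - len(m))]
-- ===== Notes on version B (the rewrite author's own statement) =====
-- stated objective: simpler
-- what changed: B replaces A's destructive backward pop-and-fold plus in-place index loops by a single forward scatter r[i % n] += v into a fresh length-n array and one comprehension building the masked result, with an explicit short-input branch that just pads and masks.
import Mathlib
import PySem

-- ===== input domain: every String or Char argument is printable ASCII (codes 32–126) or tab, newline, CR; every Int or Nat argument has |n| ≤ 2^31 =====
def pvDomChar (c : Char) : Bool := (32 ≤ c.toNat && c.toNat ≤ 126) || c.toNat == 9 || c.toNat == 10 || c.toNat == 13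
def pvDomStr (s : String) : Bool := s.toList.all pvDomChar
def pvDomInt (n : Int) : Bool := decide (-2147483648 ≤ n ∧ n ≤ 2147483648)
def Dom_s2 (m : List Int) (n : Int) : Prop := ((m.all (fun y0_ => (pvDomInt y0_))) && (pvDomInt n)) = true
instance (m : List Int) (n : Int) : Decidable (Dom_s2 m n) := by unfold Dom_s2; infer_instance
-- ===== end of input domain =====

-- B replaces A's destructive backward pop-and-fold with a forward modular scatter plus one
-- comprehension (objective: simpler); equal on all inputs with n ≥ 1 (A raises IndexError for n ≤ 0).

-- ===== PORT A =====
-- while k>n: out[k-1-n] += out.pop(); k-=1   (indices are in range whenever n ≥ 1)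
def s2Reduce (out : List Int) (n : Int) : List Int :=
  if h : out ≠ [] ∧ n < (out.length : Int) then
    let v := out.getLast h.1
    let rest := out.dropLast
    let j := ((out.length : Int) - 1 - n).toNat
    s2Reduce (rest.set j (rest.getD j 0 + v)) n
  else out
termination_by out.length
decreasing_by
  simp only [List.length_set, List.length_dropLast]
  exact Nat.sub_lt (List.length_pos_iff.mpr h.1) Nat.one_pos

-- while k<n-1: out += [0]; k+=1
def s2Pad (out : List Int) (n : Int) : List Int :=
  if h : (out.length : Int) < n - 1 then s2Pad (out ++ [0]) n else out
termination_by (n - 1 - (out.length : Int)).toNat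
decreasing_by simp only [List.length_append, List.length_singleton]; omega

def s2 (m : List Int) (n : Int) : List Int :=
  let out := s2Reduce m n
  let out := s2Pad out n
  let out :=
    if (out.length : Int) = n then
      ((PySem.List.pyRange 0 (n - 1) 1).foldl
        (fun o i => o.set i.toNat (o.getD i.toNat 0 - o.getD (n - 1).toNat 0)) out).dropLast
    else out
  (PySem.List.pyRange 0 (n - 1) 1).foldl
    (fun o i => o.set i.toNat (PySem.Int.band (o.getD i.toNat 0) 1)) out

-- ===== PORT B =====
-- r = [0]*n; for i, v in enumerate(m): r[i % n] += v
def s2Scat (m : List Int) (n : Int) : List Int :=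
  (PySem.List.enumerate m 0).foldl
    (fun r p =>
      let j := (PySem.Int.mod p.1 n).toNat
      r.set j (r.getD j 0 + p.2))
    (List.replicate n.toNat 0)

def s2_alt (m : List Int) (n : Int) : List Int :=
  if (m.length : Int) ≥ n then
    let r := s2Scat m n
    let last := r.getD (n - 1).toNat 0
    (PySem.List.pyRange 0 (n - 1) 1).map (fun i => PySem.Int.band (r.getD i.toNat 0 - last) 1)
  else
    (m ++ List.replicate (n - 1 - (m.length : Int)).toNat 0).map (fun x => PySem.Int.band x 1)

-- ===== PRECONDITION & SPEC =====
-- A raises (IndexError) on every input with n ≤ 0; those inputs are excluded.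
def Pre_s2 (m : List Int) (n : Int) : Prop := 1 ≤ n
instance (m : List Int) (n : Int) : Decidable (Pre_s2 m n) := by unfold Pre_s2; infer_instance
def pvWitness_s2 : List Int × Int := ([5, -3, 2, 7, 1], 3)

def Spec_s2 (m : List Int) (n : Int) (out : List Int) : Prop := out = s2_alt m n
instance (m : List Int) (n : Int) (out : List Int) : Decidable (Spec_s2 m n out) := by unfold Spec_s2; infer_instance

-- ===== CLAIM (what is proved, stated in full; the proofs are below) =====
def Claim_equal_s2 : Prop := ∀ (m : List Int) (n : Int), Dom_s2 m n → Pre_s2 m n → Spec_s2 m n (s2 m n)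

-- ===== LEMMAS AND PROOFS =====

-- getD/set helpers
theorem getD_set_lt (l : List Int) (i : Nat) (h : i < l.length) (a : Int) :
    (l.set i a).getD i 0 = a := by
  simp [List.getD, List.getElem?_set_self h]

theorem getD_set_ne (l : List Int) (i k : Nat) (h : i ≠ k) (a : Int) :
    (l.set i a).getD k 0 = l.getD k 0 := by
  simp [List.getD, List.getElem?_set_ne h]


theorem set_append_len : ∀ (l r : List Int) (a : Int), (l ++ r).set l.length a = l ++ r.set 0 a := by
  intro l
  induction l with
  | nil => intro r a; simp
  | cons x xs ih => intro r a; simp only [List.cons_append, List.length_cons, List.set_cons_succ, ih]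

theorem getD_append_len (l : List Int) (x : Int) (rest : List Int) :
    (l ++ x :: rest).getD l.length 0 = x := by
  rw [List.getD_eq_getElem?_getD, List.getElem?_append_right (le_refl _)]
  simp

theorem set_comm' (l : List Int) (i k : Nat) (h : i ≠ k) (a b : Int) :
    (l.set i a).set k b = (l.set k b).set i a := by
  apply List.ext_getElem (by simp)
  intro j h1 h2
  simp only [List.getElem_set]
  split_ifs <;> simp_all

-- mod facts (Python % with positive divisor)
theorem modNat_lt (x n : Int) (hn : 0 < n) : (PySem.Int.mod x n).toNat < n.toNat := by
  rw [PySem.Int.mod_eq_emod_of_pos hn]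
  have h1 := Int.emod_nonneg x (by omega : n ≠ 0)
  have h2 := Int.emod_lt_of_pos x hn
  omega

theorem mod_small (x n : Int) (hn : 0 < n) (h0 : 0 ≤ x) (h1 : x < n) :
    PySem.Int.mod x n = x := by
  rw [PySem.Int.mod_eq_emod_of_pos hn]
  exact Int.emod_eq_of_lt h0 h1

theorem mod_add_n (x n : Int) (hn : 0 < n) :
    PySem.Int.mod (x + n) n = PySem.Int.mod x n := by
  rw [PySem.Int.mod_eq_emod_of_pos hn, PySem.Int.mod_eq_emod_of_pos hn]
  rw [show x + n = x + n * 1 by ring, Int.add_mul_emod_self_left]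

-- the scatter fold, one element appended at the back
theorem scat_append (l : List Int) (v n : Int) :
    s2Scat (l ++ [v]) n =
      (s2Scat l n).set (PySem.Int.mod (l.length : Int) n).toNat
        ((s2Scat l n).getD (PySem.Int.mod (l.length : Int) n).toNat 0 + v) := by
  unfold s2Scat
  rw [PySem.List.enumerate_append, List.foldl_append]
  simp [PySem.List.enumerate_cons, PySem.List.enumerate_nil]

theorem scat_length (l : List Int) (n : Int) : (s2Scat l n).length = n.toNat := by
  induction l using List.reverseRecOn with
  | nil => simp [s2Scat, PySem.List.enumerate_nil]
  | append_singleton l v ih => rw [scat_append]; simp [ih]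

-- scatter of a short list is the list padded with zeros
theorem scat_of_short (n : Int) (hn : 0 < n) :
    ∀ l : List Int, l.length ≤ n.toNat →
      s2Scat l n = l ++ List.replicate (n.toNat - l.length) 0 := by
  intro l
  induction l using List.reverseRecOn with
  | nil => intro _; simp [s2Scat, PySem.List.enumerate_nil]
  | append_singleton l v ih =>
    intro h
    have hlen : l.length < n.toNat := by simp at h; omega
    rw [scat_append, ih (by omega)]
    have hm : PySem.Int.mod (l.length : Int) n = (l.length : Int) :=
      mod_small _ _ hn (by omega) (by omega)
    rw [hm, Int.toNat_natCast]
    have hk : n.toNat - l.length = (n.toNat - (l.length + 1)) + 1 := by omega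
    rw [hk, List.replicate_succ, getD_append_len, set_append_len]
    simp

-- scatter after bumping entry j (j in range) = scatter then bump residue j mod n
theorem scat_bump (n : Int) (hn : 0 < n) (v : Int) :
    ∀ (l : List Int) (j : Nat), j < l.length →
      s2Scat (l.set j (l.getD j 0 + v)) n
        = (s2Scat l n).set (PySem.Int.mod (j : Int) n).toNat
            ((s2Scat l n).getD (PySem.Int.mod (j : Int) n).toNat 0 + v) := by
  intro l
  induction l using List.reverseRecOn with
  | nil => intro j hj; simp at hj
  | append_singleton l w ih =>
    intro j hj
    simp only [List.length_append, List.length_singleton] at hj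
    rcases Nat.lt_succ_iff_lt_or_eq.mp hj with hlt | heq
    · -- j hits the front part l
      have hgd : (l ++ [w]).getD j 0 = l.getD j 0 := by
        rw [List.getD_eq_getElem?_getD, List.getD_eq_getElem?_getD,
            List.getElem?_append_left hlt]
      rw [hgd, List.set_append_left _ _ hlt, scat_append, scat_append]
      simp only [List.length_set]
      rw [ih j hlt]
      have hjN := modNat_lt (j : Int) n hn
      have hkN := modNat_lt (l.length : Int) n hn
      have hsl := scat_length l n
      by_cases hjk : (PySem.Int.mod (j : Int) n).toNat = (PySem.Int.mod (l.length : Int) n).toNat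
      · rw [hjk]
        rw [getD_set_lt _ _ (by omega), List.set_set, getD_set_lt _ _ (by omega), List.set_set]
        congr 1; ring
      · rw [getD_set_ne _ _ _ hjk, getD_set_ne _ _ _ (Ne.symm hjk),
            set_comm' _ _ _ hjk]
    · -- j is the appended element
      subst heq
      rw [getD_append_len, set_append_len]
      simp only [List.set_cons_zero]
      rw [scat_append, scat_append]
      have hkN := modNat_lt (l.length : Int) n hn
      have hsl := scat_length l n
      rw [getD_set_lt _ _ (by omega), List.set_set]
      congr 1; ring

-- A's first while-loop computes the scatter (when it has at least n entries)
theorem reduce_eq_scat (n : Int) (hn : 0 < n) :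
    ∀ (k : Nat) (out : List Int), out.length = k → n ≤ (out.length : Int) →
      s2Reduce out n = s2Scat out n := by
  intro k
  induction k using Nat.strong_induction_on with
  | _ k ih =>
    intro out hk hnk
    rw [s2Reduce]
    by_cases hc : out ≠ [] ∧ n < (out.length : Int)
    · rw [dif_pos hc]
      have hne := hc.1
      have hlt := hc.2
      have hstep :
          ((out.dropLast.set ((out.length : Int) - 1 - n).toNat
            (out.dropLast.getD ((out.length : Int) - 1 - n).toNat 0 + out.getLast hne))).length
            = out.length - 1 := by
        simp [List.length_set, List.length_dropLast]
      have hrec := ih (k - 1) (by omega) _ (by rw [hstep]; omega) (by rw [hstep]; push_cast; omega)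
      rw [hrec]
      -- now show the scatter is invariant under one reduction step
      have hdl : out.dropLast.length = out.length - 1 := by simp
      set l := out.dropLast with hl
      set v := out.getLast hne with hv
      have hsplit : l ++ [v] = out := List.dropLast_append_getLast hne
      have hllen : (l.length : Int) = (out.length : Int) - 1 := by
        rw [hdl]; have := List.length_pos_iff.mpr hne; push_cast; omega
      have hj : (((out.length : Int) - 1 - n).toNat : Int) = (l.length : Int) - n := by
        rw [hllen]; omega
      have hjlt : ((out.length : Int) - 1 - n).toNat < l.length := by omega
      rw [scat_bump n hn _ l _ hjlt]
      conv_rhs => rw [← hsplit, scat_append]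
      have hmeq : PySem.Int.mod ((((out.length : Int) - 1 - n).toNat : Int)) n
          = PySem.Int.mod (l.length : Int) n := by
        rw [show (l.length : Int) = (((out.length : Int) - 1 - n).toNat : Int) + n by omega]
        rw [mod_add_n _ _ hn]
      rw [hmeq]
    · rw [dif_neg hc]
      have hlen : out.length = n.toNat := by
        by_cases he : out = []
        · exfalso; subst he; simp at hnk; omega
        · have : ¬ n < (out.length : Int) := fun h => hc ⟨he, h⟩
          omega
      rw [scat_of_short n hn out (by omega)]
      rw [hlen]; simp

-- A's padding loop
theorem pad_eq (n : Int) :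
    ∀ (k : Nat) (out : List Int), (n - 1 - (out.length : Int)).toNat = k →
      s2Pad out n = out ++ List.replicate (n - 1 - (out.length : Int)).toNat 0 := by
  intro k
  induction k with
  | zero =>
    intro out hk
    rw [s2Pad, dif_neg (by omega : ¬ ((out.length : Int) < n - 1))]
    rw [hk]; simp
  | succ k ihk =>
    intro out hk
    rw [s2Pad, dif_pos (by omega : (out.length : Int) < n - 1)]
    have hlen : ((out ++ [0]).length : Int) = (out.length : Int) + 1 := by simp
    rw [ihk (out ++ [0]) (by rw [hlen]; omega)]
    rw [hlen, hk]
    rw [show n - 1 - ((out.length : Int) + 1) = n - 1 - (out.length : Int) - 1 by ring]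
    have : (n - 1 - (out.length : Int) - 1).toNat = k := by omega
    rw [this]
    simp [List.replicate_succ, List.append_assoc]

-- generic: the in-place 'for i in range(len): l[i] = f(l[i])' loop is map f
theorem foldl_mask (f : Int → Int) :
    ∀ (l2 pre : List Int),
      (PySem.List.pyRange (pre.length : Int) ((pre.length : Int) + (l2.length : Int)) 1).foldl
        (fun o i => o.set i.toNat (f (o.getD i.toNat 0))) (pre ++ l2)
      = pre ++ l2.map f := by
  intro l2
  induction l2 with
  | nil => intro pre; rw [PySem.List.pyRange_one_eq_nil (by simp)]; simp
  | cons x xs ihx =>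
    intro pre
    rw [PySem.List.pyRange_one_cons (by push_cast [List.length_cons]; omega)]
    simp only [List.foldl_cons, Int.toNat_natCast]
    have hgd : (pre ++ x :: xs).getD pre.length 0 = x := by
      rw [List.getD_eq_getElem?_getD, List.getElem?_append_right (le_refl _)]
      simp
    have hset : (pre ++ x :: xs).set pre.length (f x) = (pre ++ [f x]) ++ xs := by
      rw [set_append_len]
      simp
    rw [hgd, hset]
    have := ihx (pre ++ [f x])
    rw [show ((pre ++ [f x]).length : Int) = (pre.length : Int) + 1 by simp] at this
    rw [show (pre.length : Int) + ((x :: xs).length : Int)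
        = (pre.length : Int) + 1 + (xs.length : Int) by push_cast [List.length_cons]; omega]
    rw [this]
    simp

theorem foldl_mask_all (f : Int → Int) (l : List Int) (e : Int) (he : e = (l.length : Int)) :
    (PySem.List.pyRange 0 e 1).foldl (fun o i => o.set i.toNat (f (o.getD i.toNat 0))) l
      = l.map f := by
  subst he
  have := foldl_mask f l []
  simpa using this

-- generic: A's subtraction loop over all but the last entry
theorem foldl_sub (c : Int) (d : Nat) :
    ∀ (l2 pre : List Int), d = pre.length + l2.length →
      (PySem.List.pyRange (pre.length : Int) (d : Int) 1).foldl
        (fun o i => o.set i.toNat (o.getD i.toNat 0 - o.getD d 0)) (pre ++ l2 ++ [c])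
      = pre ++ l2.map (fun x => x - c) ++ [c] := by
  intro l2
  induction l2 with
  | nil =>
    intro pre hd
    simp only [List.length_nil] at hd
    rw [PySem.List.pyRange_one_eq_nil (by omega)]
    simp
  | cons x xs ihx =>
    intro pre hd
    simp only [List.length_cons] at hd
    rw [PySem.List.pyRange_one_cons (by push_cast; omega)]
    simp only [List.foldl_cons, Int.toNat_natCast]
    have hassoc : pre ++ x :: xs ++ [c] = pre ++ (x :: (xs ++ [c])) := by simp
    have hgd1 : (pre ++ x :: xs ++ [c]).getD pre.length 0 = x := by
      rw [hassoc, List.getD_eq_getElem?_getD, List.getElem?_append_right (le_refl _)]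
      simp
    have hgd2 : (pre ++ x :: xs ++ [c]).getD d 0 = c := by
      rw [hassoc, List.getD_eq_getElem?_getD,
          List.getElem?_append_right (by omega : pre.length ≤ d)]
      rw [show d - pre.length = xs.length + 1 by omega]
      simp [List.getElem?_append_right]
    have hset : (pre ++ x :: xs ++ [c]).set pre.length (x - c)
        = (pre ++ [x - c]) ++ xs ++ [c] := by
      rw [hassoc, set_append_len]
      simp
    rw [hgd1, hgd2, hset]
    have := ihx (pre ++ [x - c]) (by simp; omega)
    rw [show ((pre ++ [x - c]).length : Int) = (pre.length : Int) + 1 by simp] at this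
    rw [this]
    simp

theorem foldl_sub_all (c : Int) (front : List Int) (e : Int) (he : e = (front.length : Int)) :
    (PySem.List.pyRange 0 e 1).foldl
        (fun o i => o.set i.toNat (o.getD i.toNat 0 - o.getD front.length 0)) (front ++ [c])
      = front.map (fun x => x - c) ++ [c] := by
  subst he
  have := foldl_sub c front.length front []
  simpa using (this (by simp))

-- ===== VERDICT (by name: the statement is the Claim_ definition above) =====
theorem s2_spec : Claim_equal_s2 := by
  intro m n _ hpre
  have hn : 0 < n := hpre
  unfold Spec_s2
  simp only [s2, s2_alt]
  by_cases hge : (m.length : Int) ≥ n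
  · rw [if_pos hge]
    rw [reduce_eq_scat n hn m.length m rfl hge]
    have hrl : (s2Scat m n).length = n.toNat := scat_length m n
    rw [pad_eq n (n - 1 - ((s2Scat m n).length : Int)).toNat _ rfl]
    rw [show (n - 1 - ((s2Scat m n).length : Int)).toNat = 0 by rw [hrl]; omega]
    simp only [List.replicate_zero, List.append_nil]
    rw [if_pos (by rw [hrl]; omega)]
    have hne : s2Scat m n ≠ [] := by
      intro h; rw [h] at hrl; simp at hrl; omega
    obtain ⟨front, c, hsplit⟩ : ∃ front c, s2Scat m n = front ++ [c] :=
      ⟨_, _, (List.dropLast_append_getLast hne).symm⟩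
    rw [hsplit]
    have hfl : front.length = n.toNat - 1 := by
      rw [hsplit] at hrl; simp at hrl; omega
    rw [show (n - 1).toNat = front.length by omega]
    rw [foldl_sub_all c front (n - 1) (by rw [hfl]; omega)]
    rw [List.dropLast_concat]
    rw [foldl_mask_all (fun x => PySem.Int.band x 1) _ (n - 1)
        (by rw [List.length_map, hfl]; omega)]
    rw [List.map_map]
    have hc : (front ++ [c]).getD front.length 0 = c := by
      rw [List.getD_eq_getElem?_getD, List.getElem?_append_right (le_refl _)]
      simp
    rw [hc]
    apply List.ext_getElem
    · rw [List.length_map, List.length_map, PySem.List.length_pyRange_one, hfl]; omega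
    · intro i h1 h2
      rw [List.getElem_map, List.getElem_map, PySem.List.getElem_pyRange_one]
      have hi : i < front.length := by rwa [List.length_map] at h1
      rw [show (0 + (i : Int)).toNat = i by omega]
      rw [List.getD_eq_getElem?_getD, List.getElem?_append_left hi, List.getElem?_eq_getElem hi]
      simp
  · rw [if_neg hge]
    have hlt : (m.length : Int) < n := lt_of_not_ge hge
    rw [s2Reduce, dif_neg (fun hcc => absurd hcc.2 (by omega))]
    rw [pad_eq n (n - 1 - (m.length : Int)).toNat m rfl]
    have hplen : (m ++ List.replicate (n - 1 - (m.length : Int)).toNat 0).length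
        = (n - 1).toNat := by
      simp [List.length_append, List.length_replicate]; omega
    rw [if_neg (by rw [hplen]; omega)]
    rw [foldl_mask_all (fun x => PySem.Int.band x 1) _ (n - 1) (by rw [hplen]; omega)]
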